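-- pv_equiv track=rewrite | github.com/JonFermin/auto-erdos | library/primitive_set_witness.py | _check_pairwise_non_divisible
-- ===== SOURCE A (Python) =====
-- def _check_pairwise_non_divisible(elements: list[int]) -> tuple[bool, str]:
--     """Return (ok, reason). Sorts in place; we do not need stable order."""
--     if not elements:
--         return True, "empty primitive set is trivially primitive"
--     elements_sorted = sorted(elements)
--     seen: set[int] = set()
--     for x in elements_sorted:
--         if x in seen:
--             return False, f"duplicate element {x} in candidate"
--         seen.add(x)
--     # For each element a, scan multiples a, 2a, 3a, ... up to max(elements).
--     # If any multiple > a is in seen, a divides that element — primitive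
--     # condition violated. O(sum_{a in S} max/a) which is at most O(k * max/min).
--     max_el = elements_sorted[-1]
--     for a in elements_sorted:
--         if a < 2:
--             return False, f"element {a} below minimum 2 (primitivity is meaningless for 1 or below)"
--         # Start at 2a — `a divides a` is trivially true and not a violation.
--         m = 2 * a
--         while m <= max_el:
--             if m in seen:
--                 return False, f"{a} divides {m} — both in candidate, primitivity violated"
--             m += a
--     return True, "pairwise non-divisible"
-- ===== SOURCE B (Python) =====
-- def _check_pairwise_non_divisible(elements: list[int]) -> tuple[bool, str]:
--     """Return (ok, reason). Pairwise trial division instead of a multiples sieve."""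
--     if not elements:
--         return True, "empty primitive set is trivially primitive"
--     elements_sorted = sorted(elements)
--     seen: set[int] = set()
--     for x in elements_sorted:
--         if x in seen:
--             return False, f"duplicate element {x} in candidate"
--         seen.add(x)
--     if elements_sorted[0] < 2:
--         a = elements_sorted[0]
--         return False, f"element {a} below minimum 2 (primitivity is meaningless for 1 or below)"
--     n = len(elements_sorted)
--     for i in range(n):
--         for j in range(i + 1, n):
--             if elements_sorted[j] % elements_sorted[i] == 0:
--                 return False, (f"{elements_sorted[i]} divides {elements_sorted[j]}"
--                                f" — both in candidate, primitivity violated")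
--     return True, "pairwise non-divisible"
-- ===== Notes on version B (the rewrite author's own statement) =====
-- stated objective: simpler
-- what changed: The multiples sieve (walking arithmetic progressions up to max and testing set membership) is replaced by a direct pairwise trial-division loop over the sorted list, with the below-2 guard hoisted to a single check of the minimum; the first reported (a, m) pair and all messages are identical.
import Mathlib
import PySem

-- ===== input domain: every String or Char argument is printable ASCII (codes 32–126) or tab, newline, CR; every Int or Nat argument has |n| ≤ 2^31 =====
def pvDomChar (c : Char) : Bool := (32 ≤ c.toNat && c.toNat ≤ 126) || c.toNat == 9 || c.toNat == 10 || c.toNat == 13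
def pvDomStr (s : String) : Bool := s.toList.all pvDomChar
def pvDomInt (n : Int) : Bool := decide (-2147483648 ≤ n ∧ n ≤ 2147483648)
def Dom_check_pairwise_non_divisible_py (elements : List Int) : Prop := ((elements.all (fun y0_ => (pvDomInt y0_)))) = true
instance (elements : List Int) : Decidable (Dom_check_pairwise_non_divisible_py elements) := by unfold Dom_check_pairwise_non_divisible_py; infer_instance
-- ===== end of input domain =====

-- B replaces A's multiples sieve by a pairwise trial-division loop over the sorted list
-- (below-2 guard hoisted to the minimum element); same messages, same first violation pair.

-- ===== PORT A =====
-- message builders (shared: both Pythons format the identical f-strings)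
def pvMsgDup (x : Int) : String := "duplicate element " ++ PySem.Int.toStr x ++ " in candidate"
def pvMsgBelow (a : Int) : String := "element " ++ PySem.Int.toStr a ++ " below minimum 2 (primitivity is meaningless for 1 or below)"
def pvMsgDiv (a m : Int) : String := PySem.Int.toStr a ++ " divides " ++ PySem.Int.toStr m ++ " — both in candidate, primitivity violated"

-- the duplicate-detection loop (identical in both Pythons): first repeated x, and the final seen set
def pvDupScan : List Int → PySem.Set Int → Option Int × PySem.Set Int
  | [], seen => (none, seen)
  | x :: t, seen => if PySem.Set.contains seen x then (some x, seen) else pvDupScan t (PySem.Set.add seen x)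

-- A's inner while loop: m = 2a, m += a while m <= max_el, testing membership in seen
def pvSieve (seen : PySem.Set Int) (maxEl a : Int) (ha : 2 ≤ a) (m : Int) : Option Int :=
  if _h : m ≤ maxEl then
    if PySem.Set.contains seen m then some m else pvSieve seen maxEl a ha (m + a)
  else none
termination_by (maxEl + 1 - m).toNat
decreasing_by omega

-- A's `for a in elements_sorted` loop
def pvOuterA (seen : PySem.Set Int) (maxEl : Int) : List Int → Bool × String
  | [] => (true, "pairwise non-divisible")
  | a :: t =>
    if h : a < 2 then (false, pvMsgBelow a)
    else
      match pvSieve seen maxEl a (by omega) (2 * a) with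
      | some m => (false, pvMsgDiv a m)
      | none => pvOuterA seen maxEl t

def check_pairwise_non_divisible_py (elements : List Int) : Bool × String :=
  if elements = [] then (true, "empty primitive set is trivially primitive")
  else
    let es := PySem.List.sorted elements (fun x => x) false
    match pvDupScan es PySem.Set.empty with
    | (some x, _) => (false, pvMsgDup x)
    | (none, seen) =>
      -- elements_sorted[-1]; exact: es is nonempty here, so es[-1] never raises
      let maxEl := PySem.List.pyGetD es (-1) 0
      pvOuterA seen maxEl es

-- ===== PORT B =====
-- B's inner `for j in range(i+1, n)` loop: first later element divisible by x
def pvInnerB (x : Int) : List Int → Option Int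
  | [] => none
  | y :: t => if PySem.Int.mod y x == 0 then some y else pvInnerB x t

-- B's outer `for i in range(n)` loop over suffixes of the sorted list
def pvOuterB : List Int → Bool × String
  | [] => (true, "pairwise non-divisible")
  | x :: t =>
    match pvInnerB x t with
    | some y => (false, pvMsgDiv x y)
    | none => pvOuterB t

def check_pairwise_non_divisible_py_alt (elements : List Int) : Bool × String :=
  if elements = [] then (true, "empty primitive set is trivially primitive")
  else
    let es := PySem.List.sorted elements (fun x => x) false
    match pvDupScan es PySem.Set.empty with
    | (some x, _) => (false, pvMsgDup x)
    | (none, _) =>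
      -- elements_sorted[0]; exact: es is nonempty here
      if PySem.List.pyGetD es 0 0 < 2 then (false, pvMsgBelow (PySem.List.pyGetD es 0 0))
      else pvOuterB es

-- ===== PRECONDITION & SPEC =====
def Spec_check_pairwise_non_divisible_py (elements : List Int) (out : Bool × String) : Prop := out = check_pairwise_non_divisible_py_alt elements
instance (elements : List Int) (out : Bool × String) : Decidable (Spec_check_pairwise_non_divisible_py elements out) := by unfold Spec_check_pairwise_non_divisible_py; infer_instance

-- ===== CLAIM (what is proved, stated in full; the proofs are below) =====
def Claim_equal_check_pairwise_non_divisible_py : Prop := ∀ (elements : List Int), Dom_check_pairwise_non_divisible_py elements → Spec_check_pairwise_non_divisible_py elements (check_pairwise_non_divisible_py elements)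

-- ===== LEMMAS AND PROOFS =====

theorem pvDupScan_mem : ∀ (xs : List Int) (seen s : PySem.Set Int),
    pvDupScan xs seen = (none, s) → ∀ z : Int, z ∈ s ↔ (z ∈ seen ∨ z ∈ xs) := by
  intro xs
  induction xs with
  | nil => intro seen s h z; simp [pvDupScan] at h; simp [h]
  | cons x t ih =>
    intro seen s h z
    by_cases hc : x ∈ seen
    · simp [pvDupScan, hc] at h
    · simp [pvDupScan, hc] at h
      have := ih _ _ h z
      simp at this
      simp [this]
      tauto

theorem pvDupScan_fresh : ∀ (xs : List Int) (seen s : PySem.Set Int),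
    pvDupScan xs seen = (none, s) → ∀ z ∈ xs, z ∉ seen := by
  intro xs
  induction xs with
  | nil => intro seen s h z hz; simp at hz
  | cons x t ih =>
    intro seen s h z hz
    by_cases hc : x ∈ seen
    · simp [pvDupScan, hc] at h
    · simp [pvDupScan, hc] at h
      rcases List.mem_cons.mp hz with hz | hz
      · subst hz; exact hc
      · intro hmem
        exact ih _ _ h z hz (by simp; exact Or.inl hmem)

theorem pvDupScan_nodup : ∀ (xs : List Int) (seen s : PySem.Set Int),
    pvDupScan xs seen = (none, s) → xs.Nodup := by
  intro xs
  induction xs with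
  | nil => intro _ _ _; simp
  | cons x t ih =>
    intro seen s h
    by_cases hc : x ∈ seen
    · simp [pvDupScan, hc] at h
    · simp [pvDupScan, hc] at h
      refine List.nodup_cons.mpr ⟨?_, ih _ _ h⟩
      intro hxt
      exact pvDupScan_fresh _ _ _ h x hxt (by simp)

theorem pvLe_getLast : ∀ (l : List Int) (h : l ≠ []), l.Pairwise (· ≤ ·) → ∀ y ∈ l, y ≤ l.getLast h := by
  intro l
  induction l with
  | nil => intro h; simp at h
  | cons x t ih =>
    intro h hp y hy
    rcases List.pairwise_cons.mp hp with ⟨hx, ht⟩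
    cases t with
    | nil => simp at hy; simp [hy]
    | cons b u =>
      rw [List.getLast_cons (by simp)]
      rcases List.mem_cons.mp hy with hy | hy
      · subst hy
        exact hx _ (List.getLast_mem (by simp))
      · exact ih (by simp) ht y hy

theorem pvFind?_congr_mem {p q : Int → Bool} : ∀ (l : List Int), (∀ y ∈ l, p y = q y) → l.find? p = l.find? q := by
  intro l
  induction l with
  | nil => intro _; rfl
  | cons x t ih =>
    intro h
    have hx := h x (by simp)
    by_cases hp : p x = true
    · simp [List.find?, hp, hx ▸ hp]
    · have hq : q x ≠ true := by rw [← hx]; exact hp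
      simp [List.find?, hp, hq]
      exact ih (fun y hy => h y (by simp [hy]))

theorem pvFind?_sorted_some {p : Int → Bool} : ∀ (l : List Int), l.Pairwise (· < ·) → ∀ m ∈ l, p m = true → (∀ y : Int, y < m → p y = false) → l.find? p = some m := by
  intro l
  induction l with
  | nil => intro _ m hm; simp at hm
  | cons x t ih =>
    intro hp m hm hpm hlt
    rcases List.pairwise_cons.mp hp with ⟨hx, ht⟩
    rcases List.mem_cons.mp hm with hm | hm
    · subst hm; simp [List.find?, hpm]
    · have hxm : x < m := hx m hm
      have : p x = false := hlt x hxm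
      simp [List.find?, this]
      exact ih ht m hm hpm hlt

theorem pvInnerB_eq_find? (x : Int) : ∀ (l : List Int), pvInnerB x l = l.find? (fun y => PySem.Int.mod y x == 0) := by
  intro l
  induction l with
  | nil => rfl
  | cons y t ih =>
    by_cases h : (PySem.Int.mod y x == 0) = true
    · simp [pvInnerB, h, List.find?]
    · simp only [pvInnerB, List.find?, h]
      simp at h
      simp [ih]

-- A's sieve equals "smallest element ≥ m divisible by a", phrased as find? on the sorted list
theorem pvSieve_eq_find? (es : List Int) (seen : PySem.Set Int) (maxEl a : Int) (ha : 2 ≤ a)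
    (hseen : ∀ z : Int, z ∈ seen ↔ z ∈ es)
    (hmax : ∀ y ∈ es, y ≤ maxEl)
    (hp : es.Pairwise (· < ·)) :
    ∀ (m : Int), a ∣ m →
      pvSieve seen maxEl a ha m = es.find? (fun y => decide (m ≤ y) && (PySem.Int.mod y a == 0)) := by
  intro m
  fun_induction pvSieve seen maxEl a ha m with
  | case1 m hle hc =>
    -- m ≤ maxEl and m ∈ seen : result some m
    intro hdvd
    have hmem : m ∈ es := (hseen m).mp (by simpa using hc)
    refine (pvFind?_sorted_some es hp m hmem ?_ ?_).symm
    · simp [PySem.Int.mod_eq_zero_iff_dvd, hdvd]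
    · intro y hy
      simp [not_le.mpr hy]
  | case2 m hle hc ih =>
    -- m ≤ maxEl, m ∉ seen : recurse at m + a
    intro hdvd
    have hmes : m ∉ es := fun hmm => hc (by simpa using (hseen m).mpr hmm)
    rw [ih (Dvd.dvd.add hdvd (dvd_refl a))]
    refine pvFind?_congr_mem es ?_
    intro y hy
    by_cases hdy : a ∣ y
    · have hmody : (PySem.Int.mod y a == 0) = true := by
        simp [PySem.Int.mod_eq_zero_iff_dvd, hdy]
      have hiff : (m + a ≤ y) ↔ (m ≤ y) := by
        constructor
        · intro h; omega
        · intro h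
          by_contra hlt
          rw [not_le] at hlt
          -- m ≤ y < m + a, a ∣ y, a ∣ m ⇒ y = m, contradicting m ∉ es
          have hd : a ∣ (y - m) := dvd_sub hdy hdvd
          have h0 : 0 ≤ y - m := by omega
          have h1 : y - m < a := by omega
          have hzero : y - m = 0 := by
            rcases hd with ⟨k, hk⟩
            rcases lt_trichotomy k 0 with h' | h' | h'
            · nlinarith
            · simp [h'] at hk; omega
            · nlinarith
          have hym : y = m := by omega
          exact hmes (hym ▸ hy)
      simp [hmody, hiff]
    · have hmody : (PySem.Int.mod y a == 0) = false := by
        simp [PySem.Int.mod_eq_zero_iff_dvd, hdy]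
      simp [hmody]
  | case3 m hle =>
    intro hdvd
    symm
    apply List.find?_eq_none.mpr
    intro y hy
    have := hmax y hy
    simp [show ¬ m ≤ y by omega]

-- the two loops agree on every suffix of the sorted, distinct, all-≥2 list
theorem pvOuter_eq (es : List Int) (seen : PySem.Set Int) (maxEl : Int)
    (hseen : ∀ z : Int, z ∈ seen ↔ z ∈ es)
    (hmax : ∀ y ∈ es, y ≤ maxEl)
    (hp : es.Pairwise (· < ·))
    (h2 : ∀ y ∈ es, 2 ≤ y) :
    ∀ (rest pre : List Int), es = pre ++ rest → pvOuterA seen maxEl rest = pvOuterB rest := by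
  intro rest
  induction rest with
  | nil => intro _ _; rfl
  | cons a t ih =>
    intro pre hes
    have hamem : a ∈ es := by rw [hes]; simp
    have ha : 2 ≤ a := h2 a hamem
    have hna : ¬ a < 2 := by omega
    -- prefix (and a itself) never satisfies the sieve predicate 2a ≤ y
    have hpre : ∀ z ∈ pre ++ [a], (decide ((2 : Int) * a ≤ z) && (PySem.Int.mod z a == 0)) = false := by
      intro z hz
      have hza : z ≤ a := by
        rcases (List.mem_append.mp hz) with hz | hz
        · have := (List.pairwise_append.mp (hes ▸ hp)).2.2 z hz a (by simp)
          omega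
        · simp at hz; omega
      simp [show ¬ (2 : Int) * a ≤ z by omega]
    have hsplit : es = (pre ++ [a]) ++ t := by rw [hes]; simp
    have hfind : es.find? (fun y => decide ((2 : Int) * a ≤ y) && (PySem.Int.mod y a == 0))
        = t.find? (fun y => PySem.Int.mod y a == 0) := by
      rw [hsplit, List.find?_append]
      rw [List.find?_eq_none.mpr (by intro z hz; simp [hpre z hz])]
      simp
      refine pvFind?_congr_mem t ?_
      intro y hy
      have hay : a < y := (List.pairwise_append.mp (hsplit ▸ hp)).2.2 a (by simp) y hy
      by_cases hdy : a ∣ y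
      · have h2a : 2 * a ≤ y := by
          rcases hdy with ⟨k, hk⟩
          have hk1 : 1 < k := by nlinarith
          nlinarith
        simp [h2a]
      · have : (PySem.Int.mod y a == 0) = false := by
          simp [PySem.Int.mod_eq_zero_iff_dvd, hdy]
        simp [this]
    have hsieve := pvSieve_eq_find? es seen maxEl a (by omega) hseen hmax hp (2 * a) ⟨2, by ring⟩
    show pvOuterA seen maxEl (a :: t) = pvOuterB (a :: t)
    rw [pvOuterA, pvOuterB, dif_neg hna, hsieve, hfind, pvInnerB_eq_find?]
    cases t.find? (fun y => PySem.Int.mod y a == 0) with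
    | none => exact ih (pre ++ [a]) (by rw [hes]; simp)
    | some y => rfl

-- ===== VERDICT (by name: the statement is the Claim_ definition above) =====
theorem check_pairwise_non_divisible_py_spec : Claim_equal_check_pairwise_non_divisible_py := by
  intro elements _
  unfold Spec_check_pairwise_non_divisible_py
  unfold check_pairwise_non_divisible_py check_pairwise_non_divisible_py_alt
  by_cases hne : elements = []
  · simp [hne]
  · simp only [if_neg hne]
    set es := PySem.List.sorted elements (fun x => x) false with hes
    have hesne : es ≠ [] := by
      rw [hes]
      simpa [PySem.List.sorted_eq_nil_iff] using hne
    rcases hscan : pvDupScan es PySem.Set.empty with ⟨od, seen⟩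
    cases od with
    | some x => rfl
    | none =>
      have hseen : ∀ z : Int, z ∈ seen ↔ z ∈ es := by
        intro z
        have := pvDupScan_mem es PySem.Set.empty seen hscan z
        simpa [PySem.Set.empty] using this
      have hnd : es.Nodup := pvDupScan_nodup es PySem.Set.empty seen hscan
      have hsort : es.Pairwise (· ≤ ·) := by
        simpa using PySem.List.sorted_pairwise elements (fun x => x)
      have hp : es.Pairwise (· < ·) := by
        refine (List.pairwise_and_iff.mpr ⟨hsort, hnd⟩).imp ?_
        rintro a b ⟨hle, hne'⟩
        exact lt_of_le_of_ne hle hne'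
      have hmaxval : PySem.List.pyGetD es (-1) 0 = es.getLast hesne :=
        PySem.List.pyGetD_neg_one es 0 hesne
      have hmax : ∀ y ∈ es, y ≤ PySem.List.pyGetD es (-1) 0 := by
        rw [hmaxval]; exact pvLe_getLast es hesne hsort
      obtain ⟨b, t, hbt⟩ := List.exists_cons_of_ne_nil hesne
      have hhead : PySem.List.pyGetD es 0 0 = b := by rw [hbt]; simp [PySem.List.pyGetD_zero_cons]
      by_cases hb2 : b < 2
      · -- below-2: A's first outer iteration returns the message; B's hoisted guard returns the same
        rw [hhead]
        simp only [if_pos hb2]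
        rw [hbt, pvOuterA, dif_pos hb2]
      · have h2 : ∀ y ∈ es, 2 ≤ y := by
          intro y hy
          rw [hbt] at hy hsort
          rcases List.mem_cons.mp hy with hy | hy
          · omega
          · have := (List.pairwise_cons.mp hsort).1 y hy
            omega
        rw [hhead]
        simp only [if_neg hb2]
        exact pvOuter_eq es seen _ hseen hmax hp h2 es [] (by simp)
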